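-- pv_equiv track=rewrite | github.com/kwontaekyoon/LeetCode | Easy/1582. Special Positions in a Binary Matrix.py | numSpecial
-- ===== SOURCE A (Python) =====
-- from typing import List
--
-- def numSpecial(mat: List[List[int]]) -> int:
--     cols = [0] * len(mat[0])
--     for row in mat:
--         for col, num in enumerate(row):
--             cols[col] += num
--     res = 0
--     for row in mat:
--         if not (row.count(1) == 1):
--             continue
--         for col, num in enumerate(row):
--             if num and cols[col] == 1:
--                 res += 1
--                 break
--     return res
-- ===== SOURCE B (Python) =====
-- def numSpecial(mat):
--     def colsum(j):
--         return sum(r[j] for r in mat if j < len(r))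
--     return sum(1 for row in mat
--                if sum(v == 1 for v in row) == 1
--                and any(v and colsum(j) == 1 for j, v in enumerate(row)))
-- ===== Notes on version B (the rewrite author's own statement) =====
-- stated objective: alternative
-- what changed: B drops A's precomputed mutable column-sum table, row.count gate and break-scan entirely: it is one counting comprehension over rows whose column sums are recomputed lazily, on demand, only for candidate cells.
import Mathlib
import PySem

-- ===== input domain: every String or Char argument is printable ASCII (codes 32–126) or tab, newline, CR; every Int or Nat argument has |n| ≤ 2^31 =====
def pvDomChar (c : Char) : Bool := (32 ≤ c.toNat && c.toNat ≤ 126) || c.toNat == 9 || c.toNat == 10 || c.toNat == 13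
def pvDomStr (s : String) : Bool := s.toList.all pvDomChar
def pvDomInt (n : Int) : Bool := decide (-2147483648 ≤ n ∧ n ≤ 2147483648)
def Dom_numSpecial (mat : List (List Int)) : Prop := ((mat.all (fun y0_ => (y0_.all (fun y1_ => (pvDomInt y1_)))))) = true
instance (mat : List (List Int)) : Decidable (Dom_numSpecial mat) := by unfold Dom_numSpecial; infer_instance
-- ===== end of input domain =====

-- B has no column-sum table and no break-scan: one counting comprehension over rows,
-- with column sums recomputed lazily per candidate cell (objective: alternative, not faster).

-- ===== PORT A =====
-- cols[col] += num for (col, num) in enumerate(row); indices from enumerate are ≥ 0,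
-- and under Pre_ every index is < len(cols) (Python raises otherwise), so .toNat/set are exact there.
def pvAddRow (cols : List Int) (row : List Int) : List Int :=
  (PySem.List.enumerate row).foldl
    (fun c p => c.set p.1.toNat (PySem.List.pyGetD c p.1 0 + p.2)) cols

-- the inner 'for col, num in enumerate(row): if num and cols[col] == 1: res += 1; break'
def pvRowHit (cols : List Int) : List (Int × Int) → Int
  | [] => 0
  | (j, v) :: rest =>
      if v ≠ 0 ∧ PySem.List.pyGetD cols j 0 = 1 then 1 else pvRowHit cols rest

def numSpecial (mat : List (List Int)) : Int :=
  let cols := mat.foldl pvAddRow (List.replicate (mat.headD []).length 0)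
  mat.foldl (fun res row =>
    if ¬ (PySem.List.count row (1 : Int) = 1) then res
    else res + pvRowHit cols (PySem.List.enumerate row)) 0

-- ===== PORT B =====
-- colsum(j) = sum(r[j] for r in mat if j < len(r)); j comes from enumerate so j ≥ 0
-- and the guard j < len(r) makes pyGetD exact (Python never raises there).
def pvColSum (mat : List (List Int)) (j : Int) : Int :=
  ((mat.filter (fun r => decide (j < (r.length : Int)))).map
    (fun r => PySem.List.pyGetD r j 0)).sum

def numSpecial_alt (mat : List (List Int)) : Int :=
  ((mat.countP (fun row =>
      ((row.map (fun v => if v == 1 then (1 : Int) else 0)).sum == 1) &&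
      (PySem.List.enumerate row).any
        (fun p => p.2 != 0 && (pvColSum mat p.1 == 1)))) : Int)

-- ===== PRECONDITION & SPEC =====
-- Pre_ excludes exactly the inputs where A raises IndexError: the empty matrix (mat[0])
-- and ragged matrices containing a row longer than the first row (cols[col] out of range).
def Pre_numSpecial (mat : List (List Int)) : Prop :=
  mat ≠ [] ∧ ∀ row ∈ mat, row.length ≤ (mat.headD []).length
instance (mat : List (List Int)) : Decidable (Pre_numSpecial mat) := by
  unfold Pre_numSpecial; infer_instance

def pvWitness_numSpecial : List (List Int) := [[1, 0, 0], [0, 0, 1], [2, 0, 0]]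

def Spec_numSpecial (mat : List (List Int)) (out : Int) : Prop := out = numSpecial_alt mat
instance (mat : List (List Int)) (out : Int) : Decidable (Spec_numSpecial mat out) := by
  unfold Spec_numSpecial; infer_instance

-- ===== CLAIM (what is proved, stated in full; the proofs are below) =====
def Claim_equal_numSpecial : Prop :=
  ∀ (mat : List (List Int)), Dom_numSpecial mat → Pre_numSpecial mat →
    Spec_numSpecial mat (numSpecial mat)

-- ===== LEMMAS AND PROOFS =====

-- the column-sum of mat at column j (0 outside a short row), the common value of both sides
def pvColAt (mats : List (List Int)) (j : Nat) : Int :=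
  (mats.map (fun row => if j < row.length then row.getD j 0 else 0)).sum

theorem pvSetFold_length (ps : List (Int × Int)) (cols : List Int) :
    (ps.foldl (fun c p => c.set p.1.toNat (PySem.List.pyGetD c p.1 0 + p.2)) cols).length
      = cols.length := by
  induction ps generalizing cols with
  | nil => rfl
  | cons p t ih => rw [List.foldl_cons, ih]; simp

theorem pvEnumFold_getD (row : List Int) (s : Nat) (cols : List Int) (j : Nat)
    (h : s + row.length ≤ cols.length) :
    ((PySem.List.enumerate row (s : Int)).foldl
        (fun c p => c.set p.1.toNat (PySem.List.pyGetD c p.1 0 + p.2)) cols).getD j 0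
      = cols.getD j 0 + (if s ≤ j ∧ j < s + row.length then row.getD (j - s) 0 else 0) := by
  induction row generalizing s cols with
  | nil => simp [PySem.List.enumerate_nil]
  | cons x rest ih =>
    rw [PySem.List.enumerate_cons, List.foldl_cons]
    have hc : ((s : Int) + 1) = ((s + 1 : Nat) : Int) := by push_cast; ring
    rw [hc]
    have hlen : s < cols.length := by simp at h; omega
    set cols' := cols.set (s : Int).toNat (PySem.List.pyGetD cols (s : Int) 0 + x) with hc'
    have hcl : cols' = cols.set s (cols.getD s 0 + x) := by
      simp [hc', PySem.List.pyGetD_natCast]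
    rw [ih (s + 1) cols' (by simp [hcl]; simp at h; omega)]
    by_cases hj : j = s
    · subst hj
      have : cols'.getD j 0 = cols.getD j 0 + x := by
        rw [hcl]; simp [List.getD_eq_getElem?_getD, hlen]
      rw [this]
      have h1 : ¬ (j + 1 ≤ j ∧ j < j + 1 + rest.length) := by omega
      have h2 : j ≤ j ∧ j < j + (x :: rest).length := by simp
      rw [if_neg h1, if_pos h2]
      simp
    · have : cols'.getD j 0 = cols.getD j 0 := by
        rw [hcl]; simp [List.getD_eq_getElem?_getD, List.getElem?_set_ne (Ne.symm hj)]
      rw [this]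
      congr 1
      by_cases hin : s + 1 ≤ j ∧ j < s + 1 + rest.length
      · rw [if_pos hin, if_pos (by simp; omega)]
        have : j - s = (j - (s + 1)) + 1 := by omega
        rw [this, List.getD_cons_succ]
      · rw [if_neg hin, if_neg (by simp; omega)]

theorem pvAddRow_getD (cols row : List Int) (j : Nat) (h : row.length ≤ cols.length) :
    (pvAddRow cols row).getD j 0
      = cols.getD j 0 + (if j < row.length then row.getD j 0 else 0) := by
  unfold pvAddRow
  rw [show PySem.List.enumerate row = PySem.List.enumerate row ((0 : Nat) : Int) from rfl]
  rw [pvEnumFold_getD row 0 cols j (by omega)]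
  simp

theorem pvFold_getD (mats : List (List Int)) (cols : List Int) (j : Nat)
    (h : ∀ row ∈ mats, row.length ≤ cols.length) :
    (mats.foldl pvAddRow cols).getD j 0 = cols.getD j 0 + pvColAt mats j := by
  induction mats generalizing cols with
  | nil => simp [pvColAt]
  | cons r t ih =>
    rw [List.foldl_cons, ih _ (by
      intro row hrow
      have := pvSetFold_length (PySem.List.enumerate r) cols
      unfold pvAddRow
      rw [this]
      exact h row (List.mem_cons_of_mem _ hrow))]
    rw [pvAddRow_getD cols r j (h r (List.mem_cons_self ..))]
    simp [pvColAt]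
    ring

-- B's on-demand column sum agrees with pvColAt at nonnegative indices
theorem pvColSum_natCast (mats : List (List Int)) (k : Nat) :
    pvColSum mats (k : Int) = pvColAt mats k := by
  induction mats with
  | nil => rfl
  | cons r t ih =>
    unfold pvColSum pvColAt at ih ⊢
    by_cases hr : k < r.length
    · rw [List.filter_cons_of_pos (by simp; exact_mod_cast hr), List.map_cons, List.sum_cons,
        List.map_cons, List.sum_cons, ih, if_pos hr, PySem.List.pyGetD_natCast]
    · rw [List.filter_cons_of_neg (by simp; omega), List.map_cons, List.sum_cons,
        ih, if_neg hr]
      ring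

theorem pvRowHit_eq (mats : List (List Int)) (cols : List Int) (n : Nat)
    (hcols : ∀ k : Nat, k < n → cols.getD k 0 = pvColAt mats k)
    (ps : List (Int × Int)) (hps : ∀ p ∈ ps, 0 ≤ p.1 ∧ p.1.toNat < n) :
    pvRowHit cols ps
      = if ps.any (fun p => p.2 != 0 && (pvColSum mats p.1 == 1)) then 1 else 0 := by
  induction ps with
  | nil => rfl
  | cons p t ih =>
    obtain ⟨j, v⟩ := p
    obtain ⟨hj0, hjn⟩ := hps (j, v) (List.mem_cons_self ..)
    simp only at hj0 hjn
    have hread : PySem.List.pyGetD cols j 0 = pvColSum mats j := by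
      conv_lhs => rw [← Int.toNat_of_nonneg hj0]
      rw [PySem.List.pyGetD_natCast, hcols j.toNat hjn, ← pvColSum_natCast,
        Int.toNat_of_nonneg hj0]
    have hcond : (v ≠ 0 ∧ PySem.List.pyGetD cols j 0 = 1)
        ↔ ((v != 0 && (pvColSum mats j == 1)) = true) := by
      rw [hread]; simp
    rw [pvRowHit, List.any_cons]
    by_cases hv : v ≠ 0 ∧ PySem.List.pyGetD cols j 0 = 1
    · rw [if_pos hv]
      have := hcond.mp hv
      simp only at this
      rw [this]
      simp
    · rw [if_neg hv]
      have hb : (v != 0 && (pvColSum mats j == 1)) = false := by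
        by_contra hcon
        exact hv (hcond.mpr (by revert hcon; cases (v != 0 && (pvColSum mats j == 1)) <;> simp))
      simp only at hb
      rw [hb, Bool.false_or]
      exact ih (fun q hq => hps q (List.mem_cons_of_mem _ hq))

theorem pvReplicate_getD (n j : Nat) : (List.replicate n (0:Int)).getD j 0 = 0 := by
  simp [List.getD_eq_getElem?_getD, List.getElem?_replicate]
  split <;> rfl

-- A's 'row.count(1) == 1' and B's 'sum(v == 1 for v in row) == 1' test the same thing
theorem pvCount_eq_sum (row : List Int) :
    (PySem.List.count row (1 : Int) = 1)
      ↔ ((row.map (fun v => if v == 1 then (1 : Int) else 0)).sum == 1) = true := by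
  rw [PySem.List.count_eq, PySem.List.sum_map_ite_one_zero]
  simp [List.count]

-- ===== VERDICT (by name: the statement is the Claim_ definition above) =====
theorem numSpecial_spec : Claim_equal_numSpecial := by
  intro mat _ hpre
  obtain ⟨hne, hrows⟩ := hpre
  unfold Spec_numSpecial numSpecial numSpecial_alt
  simp only []
  set n := (mat.headD []).length with hn
  set cols := mat.foldl pvAddRow (List.replicate n 0) with hcols
  have hcolsA : ∀ k : Nat, k < n → cols.getD k 0 = pvColAt mat k := by
    intro k _
    rw [hcols, pvFold_getD mat _ k (by intro row hr; simpa using hrows row hr),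
        pvReplicate_getD, zero_add]
  -- per-row agreement of A's fold body with B's row predicate
  have hbody : ∀ row ∈ mat, ∀ res : Int,
      (if ¬ (PySem.List.count row (1 : Int) = 1) then res
        else res + pvRowHit cols (PySem.List.enumerate row))
      = (if (((row.map (fun v => if v == 1 then (1 : Int) else 0)).sum == 1) &&
            (PySem.List.enumerate row).any
              (fun p => p.2 != 0 && (pvColSum mat p.1 == 1))) = true
          then res + 1 else res) := by
    intro row hrow res
    have hlenr : row.length ≤ n := hrows row hrow
    have hhit := pvRowHit_eq mat cols n hcolsA (PySem.List.enumerate row)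
      (by
        intro p hp
        rw [PySem.List.mem_enumerate_iff] at hp
        obtain ⟨k, hk, rfl⟩ := hp
        refine ⟨by simp, ?_⟩
        simp; omega)
    by_cases hcnt : PySem.List.count row (1 : Int) = 1
    · have hbeq := (pvCount_eq_sum row).mp hcnt
      rw [if_neg (not_not_intro hcnt), hhit]
      by_cases hany : (PySem.List.enumerate row).any
          (fun p => p.2 != 0 && (pvColSum mat p.1 == 1)) = true
      · rw [if_pos hany, if_pos (by rw [hbeq, Bool.true_and]; exact hany)]
      · rw [if_neg hany, if_neg (by rw [hbeq, Bool.true_and]; exact hany), add_zero]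
    · have hbeq : ((row.map (fun v => if v == 1 then (1 : Int) else 0)).sum == 1) = false := by
        rw [← Bool.not_eq_true]
        exact fun hc => hcnt ((pvCount_eq_sum row).mpr hc)
      rw [if_pos hcnt, if_neg (by rw [hbeq, Bool.false_and]; simp)]
  refine Eq.trans (PySem.List.foldl_congr_mem' mat _
      (fun res row => if (((row.map (fun v => if v == 1 then (1 : Int) else 0)).sum == 1) &&
            (PySem.List.enumerate row).any
              (fun p => p.2 != 0 && (pvColSum mat p.1 == 1))) = true
          then res + 1 else res) 0 hbody) ?_
  rw [PySem.List.foldl_if_add_one, zero_add]
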